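-- pv_equiv track=rewrite | github.com/Agseanic/Homer | scripts/collect_status.py | split_server_blocks
-- ===== SOURCE A (Python) =====
-- def split_server_blocks(text):
--   blocks = []
--   marker = "server {"
--   start = 0
--   while True:
--     idx = text.find(marker, start)
--     if idx == -1:
--       break
--     depth = 0
--     end = idx
--     while end < len(text):
--       char = text[end]
--       if char == "{":
--         depth += 1
--       elif char == "}":
--         depth -= 1
--         if depth == 0:
--           blocks.append(text[idx : end + 1])
--           start = end + 1
--           break
--       end += 1
--     else:
--       break
--   return blocks
-- ===== SOURCE B (Python) =====
-- def split_server_blocks(text):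
--     blocks = []
--     in_block = False
--     depth = 0
--     start = 0
--     for i, ch in enumerate(text):
--         if not in_block:
--             if not text.startswith("server {", i):
--                 continue
--             in_block = True
--             depth = 0
--             start = i
--         if ch == "{":
--             depth += 1
--         elif ch == "}":
--             depth -= 1
--             if depth == 0:
--                 blocks.append(text[start:i + 1])
--                 in_block = False
--     return blocks
-- ===== Notes on version B (the rewrite author's own statement) =====
-- stated objective: simpler
-- what changed: Replaced A's nested loops (repeated text.find for the marker plus an inner brace re-scan) with one flat left-to-right pass over the indices keeping state (in_block, depth, start).
import Mathlib
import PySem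

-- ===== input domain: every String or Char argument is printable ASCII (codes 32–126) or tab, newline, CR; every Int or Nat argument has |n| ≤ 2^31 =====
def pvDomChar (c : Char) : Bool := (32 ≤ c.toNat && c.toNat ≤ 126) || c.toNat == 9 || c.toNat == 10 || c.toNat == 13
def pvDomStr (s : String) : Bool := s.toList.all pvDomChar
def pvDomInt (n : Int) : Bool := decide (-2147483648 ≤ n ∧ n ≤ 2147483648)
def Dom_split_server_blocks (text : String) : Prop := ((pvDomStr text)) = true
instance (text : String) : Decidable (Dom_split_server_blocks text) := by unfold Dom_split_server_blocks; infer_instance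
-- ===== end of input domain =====

-- B is a single flat index scan with state (in_block, depth, start) instead of A's
-- nested find/rescan loops; objective: simpler (one loop, one pass).

-- ===== PORT A =====
-- the marker "server {" as a char list
def pvMarker : List Char := "server {".toList

-- Python text.find(marker, i): first index ≥ i where the marker occurs, else none
def pvFindFrom (s : List Char) (i : Nat) : Option Nat :=
  if i + pvMarker.length ≤ s.length then
    if (s.drop i).take pvMarker.length = pvMarker then some i else pvFindFrom s (i + 1)
  else none
termination_by s.length + 1 - i

theorem pvFindFrom_ge (s : List Char) (i : Nat) (idx : Nat)
    (h : pvFindFrom s i = some idx) : i ≤ idx := by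
  fun_induction pvFindFrom s i with
  | case1 i hr hp => simp_all
  | case2 i hr hp ih => exact Nat.le_of_succ_le (ih h)
  | case3 i hr => simp_all

theorem pvFindFrom_room (s : List Char) (i : Nat) (idx : Nat)
    (h : pvFindFrom s i = some idx) : idx + pvMarker.length ≤ s.length := by
  fun_induction pvFindFrom s i with
  | case1 i hr hp => simp_all
  | case2 i hr hp ih => exact ih h
  | case3 i hr => simp_all

mutual
-- outer 'while True' loop of A: find marker, then run the inner brace scan
def pvOuterA (s : List Char) (start : Nat) (blocks : List String) : List String :=
  match h : pvFindFrom s start with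
  | none => blocks
  | some idx => pvInnerA s idx idx 0 blocks
termination_by (s.length + 1 - start, 1)
decreasing_by
  have hge := pvFindFrom_ge s start idx h
  have hroom := pvFindFrom_room s start idx h
  have hm : pvMarker.length = 8 := by decide
  rcases Nat.lt_or_ge start idx with hlt | hge2
  · exact Prod.Lex.left _ _ (by omega)
  · have he : idx = start := by omega
    subst he
    exact Prod.Lex.right _ (by omega)

-- inner 'while end < len(text)' loop of A
def pvInnerA (s : List Char) (idx endp : Nat) (depth : Int) (blocks : List String) : List String :=
  if h : endp < s.length then
    let c := s.getD endp ' '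
    if c = '{' then pvInnerA s idx (endp + 1) (depth + 1) blocks
    else if c = '}' then
      if depth - 1 = 0 then
        pvOuterA s (endp + 1) (blocks ++ [String.ofList ((s.drop idx).take (endp + 1 - idx))])
      else pvInnerA s idx (endp + 1) (depth - 1) blocks
    else pvInnerA s idx (endp + 1) depth blocks
  else blocks
termination_by (s.length + 1 - endp, 0)
decreasing_by
  all_goals exact Prod.Lex.left _ _ (by omega)
end

def split_server_blocks (text : String) : List String :=
  pvOuterA text.toList 0 []

-- ===== PORT B =====
-- flat scan: one index i, state (in_block, depth, start)
def pvGoB (s : List Char) (i : Nat) (inB : Bool) (depth : Int) (start : Nat)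
    (acc : List String) : List String :=
  if h : i < s.length then
    if inB ∨ (s.drop i).take pvMarker.length = pvMarker then
      let d := if inB then depth else 0
      let st := if inB then start else i
      let c := s.getD i ' '
      if c = '{' then pvGoB s (i + 1) true (d + 1) st acc
      else if c = '}' then
        if d - 1 = 0 then
          pvGoB s (i + 1) false (d - 1) st (acc ++ [String.ofList ((s.drop st).take (i + 1 - st))])
        else pvGoB s (i + 1) true (d - 1) st acc
      else pvGoB s (i + 1) true d st acc
    else pvGoB s (i + 1) false depth start acc
  else acc
termination_by s.length - i

def split_server_blocks_alt (text : String) : List String :=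
  pvGoB text.toList 0 false 0 0 []

-- ===== PRECONDITION & SPEC =====
def Spec_split_server_blocks (text : String) (out : List String) : Prop := out = split_server_blocks_alt text
instance (text : String) (out : List String) : Decidable (Spec_split_server_blocks text out) := by unfold Spec_split_server_blocks; infer_instance

-- ===== CLAIM (what is proved, stated in full; the proofs are below) =====
def Claim_equal_split_server_blocks : Prop := ∀ (text : String), Dom_split_server_blocks text → Spec_split_server_blocks text (split_server_blocks text)

-- ===== LEMMAS AND PROOFS =====

theorem pvMarker_len : pvMarker.length = 8 := by decide

theorem pvFindFrom_none_of_ge (s : List Char) (i : Nat) (h : s.length ≤ i) :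
    pvFindFrom s i = none := by
  rw [pvFindFrom, if_neg]
  have := pvMarker_len
  omega

theorem pvFindFrom_step (s : List Char) (i : Nat)
    (hp : ¬ (s.drop i).take pvMarker.length = pvMarker) :
    pvFindFrom s i = pvFindFrom s (i + 1) := by
  by_cases hr : i + pvMarker.length ≤ s.length
  · rw [pvFindFrom, if_pos hr, if_neg hp]
  · rw [pvFindFrom, if_neg hr]
    rw [pvFindFrom, if_neg (by have := pvMarker_len; omega)]

theorem pvPrefix_room (s : List Char) (i : Nat)
    (hp : (s.drop i).take pvMarker.length = pvMarker) :
    i + pvMarker.length ≤ s.length := by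
  have := congrArg List.length hp
  simp [List.length_take, List.length_drop] at this
  have := pvMarker_len
  omega

theorem pvFindFrom_self (s : List Char) (i : Nat)
    (hp : (s.drop i).take pvMarker.length = pvMarker) :
    pvFindFrom s i = some i := by
  rw [pvFindFrom, if_pos (pvPrefix_room s i hp), if_pos hp]

theorem pvPrefix_head (s : List Char) (i : Nat)
    (hp : (s.drop i).take pvMarker.length = pvMarker) :
    s.getD i ' ' = 's' := by
  have h0 := congrArg (fun l => l[0]?) hp
  simp [List.getElem?_drop, pvMarker] at h0
  simp [List.getD, h0]

theorem main_lemma (s : List Char) : ∀ (k i : Nat), s.length - i ≤ k →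
    (∀ (d : Int) (st : Nat) (acc : List String), pvGoB s i false d st acc = pvOuterA s i acc) ∧
    (∀ (d : Int) (st : Nat) (acc : List String), pvGoB s i true d st acc = pvInnerA s st i d acc) := by
  intro k
  induction k with
  | zero =>
    intro i hi
    have hn : s.length ≤ i := by omega
    constructor
    · intro d st acc
      rw [pvGoB, dif_neg (by omega), pvOuterA]
      rw [pvFindFrom_none_of_ge s i hn]
    · intro d st acc
      rw [pvGoB, dif_neg (by omega), pvInnerA, dif_neg (by omega)]
  | succ k ih =>
    intro i hi
    by_cases hn : i < s.length
    case neg =>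
      constructor
      · intro d st acc
        rw [pvGoB, dif_neg hn, pvOuterA]
        rw [pvFindFrom_none_of_ge s i (by omega)]
      · intro d st acc
        rw [pvGoB, dif_neg hn, pvInnerA, dif_neg hn]
    case pos =>
    have ih' := ih (i + 1) (by omega)
    constructor
    · intro d st acc
      rw [pvGoB, dif_pos hn]
      by_cases hp : (s.drop i).take pvMarker.length = pvMarker
      · have hc := pvPrefix_head s i hp
        rw [if_pos (Or.inr hp)]
        simp only [Bool.false_eq_true, if_false, hc]
        rw [if_neg (by decide), if_neg (by decide)]
        rw [pvOuterA]
        rw [pvFindFrom_self s i hp]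
        show _ = pvInnerA s i i 0 acc
        rw [pvInnerA, dif_pos hn]
        simp only [hc]
        rw [if_neg (by decide), if_neg (by decide)]
        exact ih'.2 0 i acc
      · rw [if_neg (by simp [hp])]
        rw [ih'.1 d st acc]
        rw [pvOuterA, pvOuterA, pvFindFrom_step s i hp]
    · intro d st acc
      rw [pvGoB, dif_pos hn, if_pos (Or.inl rfl)]
      simp only [if_true]
      rw [pvInnerA, dif_pos hn]
      by_cases h1 : s.getD i ' ' = '{'
      · simp only [h1]
        exact ih'.2 (d + 1) st acc
      · rw [if_neg h1, if_neg h1]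
        by_cases h2 : s.getD i ' ' = '}'
        · rw [if_pos h2, if_pos h2]
          by_cases h3 : d - 1 = 0
          · rw [if_pos h3, if_pos h3]
            exact ih'.1 (d - 1) st _
          · rw [if_neg h3, if_neg h3]
            exact ih'.2 (d - 1) st acc
        · rw [if_neg h2, if_neg h2]
          exact ih'.2 d st acc

-- ===== VERDICT (by name: the statement is the Claim_ definition above) =====
theorem split_server_blocks_spec : Claim_equal_split_server_blocks := by
  intro text _
  unfold Spec_split_server_blocks split_server_blocks split_server_blocks_alt
  exact ((main_lemma text.toList (text.toList.length) 0 (by omega)).1 0 0 []).symm
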